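-- pv_equiv track=rewrite | github.com/joohwan38/ppt_image_translator | utils/image_utils.py | match_original_and_translated
-- ===== SOURCE A (Python) =====
-- def match_original_and_translated(original_texts, translated_lines):
--     """원본 텍스트와 번역된 텍스트를 매핑"""
--     # 원본 텍스트 수와 번역된 텍스트 수가 같으면 1:1 매핑
--     if len(original_texts) == len(translated_lines):
--         return {original: translated for original, translated in zip(original_texts, translated_lines)}
--
--     # 원본 텍스트 수보다 번역된 텍스트 수가 적으면, 나머지는 빈 문자열로 매핑
--     if len(original_texts) > len(translated_lines):
--         mapping = {}
--         for i, original in enumerate(original_texts):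
--             if i < len(translated_lines):
--                 mapping[original] = translated_lines[i]
--             else:
--                 mapping[original] = ""
--         return mapping
--
--     # 원본 텍스트 수보다 번역된 텍스트 수가 많으면, 마지막 원본 텍스트에 나머지 번역 텍스트 합치기
--     mapping = {}
--     for i, original in enumerate(original_texts):
--         if i < len(original_texts) - 1:
--             mapping[original] = translated_lines[i]
--         else:
--             # 마지막 원본 텍스트에 나머지 번역 텍스트 합치기
--             mapping[original] = "\n".join(translated_lines[i:])
--
--     return mapping
-- ===== SOURCE B (Python) =====
-- def match_original_and_translated(original_texts, translated_lines):
--     # Streaming decomposition: a generator consumes the translated lines with an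
--     # iterator -- the first n-1 slots take the next line (defaulting to ""),
--     # the final slot swallows whatever remains, joined with newlines.
--     # No comparison of the two lengths is ever made.
--     def fitted(lines, n):
--         it = iter(lines)
--         for _ in range(n - 1):
--             yield next(it, "")
--         if n > 0:
--             yield "\n".join(it)
--     return dict(zip(original_texts, fitted(translated_lines, len(original_texts))))
-- ===== Notes on version B (the rewrite author's own statement) =====
-- stated objective: simpler
-- what changed: B never compares the two lengths: a streaming generator consumes the translated lines through an iterator, yielding next(it, '') for the first n-1 slots and '\n'.join of whatever remains for the last slot, and the result is one dict(zip(...)); A's three length-cases with index loops disappear.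
import Mathlib
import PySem

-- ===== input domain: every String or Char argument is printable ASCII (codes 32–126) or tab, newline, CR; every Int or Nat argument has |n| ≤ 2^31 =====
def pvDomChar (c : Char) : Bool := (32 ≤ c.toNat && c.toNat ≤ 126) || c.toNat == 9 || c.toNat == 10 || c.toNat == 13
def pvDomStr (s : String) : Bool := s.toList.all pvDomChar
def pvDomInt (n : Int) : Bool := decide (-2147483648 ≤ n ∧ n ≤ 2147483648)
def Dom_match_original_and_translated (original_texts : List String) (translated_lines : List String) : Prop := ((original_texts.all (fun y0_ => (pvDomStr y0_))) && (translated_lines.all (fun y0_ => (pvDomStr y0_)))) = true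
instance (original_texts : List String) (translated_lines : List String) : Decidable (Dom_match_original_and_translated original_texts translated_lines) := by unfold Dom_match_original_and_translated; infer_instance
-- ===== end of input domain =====

-- B drops A's three length-case loops: a streaming generator consumes the translated lines through an
-- iterator (n-1 slots take next(it, ""), the last slot joins whatever remains), then one dict(zip(...)).

-- ===== PORT A =====
def match_original_and_translated (original_texts : List String) (translated_lines : List String) : List (String × String) :=
  if original_texts.length = translated_lines.length then
    -- {o: t for o, t in zip(...)}
    ((original_texts.zip translated_lines).foldl
      (fun (d : PySem.Dict String String) p => d.insert p.1 p.2) PySem.Dict.empty).items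
  else if translated_lines.length < original_texts.length then
    -- for i, original in enumerate(original_texts): …
    ((PySem.List.enumerate original_texts).foldl
      (fun (d : PySem.Dict String String) p =>
        if p.1 < (translated_lines.length : Int) then
          d.insert p.2 (PySem.List.pyGetD translated_lines p.1 "")   -- translated_lines[i], guard makes it in range
        else d.insert p.2 "") PySem.Dict.empty).items
  else
    ((PySem.List.enumerate original_texts).foldl
      (fun (d : PySem.Dict String String) p =>
        if p.1 < (original_texts.length : Int) - 1 then
          d.insert p.2 (PySem.List.pyGetD translated_lines p.1 "")   -- translated_lines[i], guard makes it in range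
        else d.insert p.2 (PySem.Str.join "\n" (PySem.List.slice translated_lines (some p.1) none)))
      PySem.Dict.empty).items

-- ===== PORT B =====
-- the generator's for-loop: k copies of `yield next(it, "")`, returning the yielded
-- items together with the iterator's remaining stream
def pvFittedGo : Nat → List String → List String × List String
  | 0, rest => ([], rest)
  | k + 1, [] => let r := pvFittedGo k []; ("" :: r.1, r.2)
  | k + 1, l :: ls => let r := pvFittedGo k ls; (l :: r.1, r.2)

def match_original_and_translated_alt (original_texts : List String) (translated_lines : List String) : List (String × String) :=
  let n := original_texts.length
  -- fitted(translated_lines, n): range(n-1) next-with-default steps, then (if n > 0) join the rest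
  let fit :=
    let r := pvFittedGo (n - 1) translated_lines
    if 0 < n then r.1 ++ [PySem.Str.join "\n" r.2] else r.1
  ((original_texts.zip fit).foldl
    (fun (d : PySem.Dict String String) p => d.insert p.1 p.2) PySem.Dict.empty).items

-- ===== PRECONDITION & SPEC =====
def Spec_match_original_and_translated (original_texts : List String) (translated_lines : List String) (out : List (String × String)) : Prop := out = match_original_and_translated_alt original_texts translated_lines
instance (original_texts : List String) (translated_lines : List String) (out : List (String × String)) : Decidable (Spec_match_original_and_translated original_texts translated_lines out) := by unfold Spec_match_original_and_translated; infer_instance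

-- ===== CLAIM (what is proved, stated in full; the proofs are below) =====
def Claim_equal_match_original_and_translated : Prop := ∀ (original_texts : List String) (translated_lines : List String), Dom_match_original_and_translated original_texts translated_lines → Spec_match_original_and_translated original_texts translated_lines (match_original_and_translated original_texts translated_lines)

-- ===== LEMMAS AND PROOFS =====

-- the generator loop yields the first k lines padded with "" and leaves the rest in the iterator
theorem pvFittedGo_eq (k : Nat) (tl : List String) :
    pvFittedGo k tl = (tl.take k ++ List.replicate (k - tl.length) "", tl.drop k) := by
  induction k generalizing tl with
  | zero => simp [pvFittedGo]
  | succ k ih =>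
    cases tl with
    | nil => simp [pvFittedGo, ih, List.replicate_succ]
    | cons l ls => simp [pvFittedGo, ih]

-- A's enumerate loop, with a value depending only on the index, is the zip fold over the mapped value list.
theorem pv_fold_enum_eq_fold_zip (f : Int → String) (ot : List String) (s : Int)
    (d : PySem.Dict String String) :
    (PySem.List.enumerate ot s).foldl (fun d p => d.insert p.2 (f p.1)) d
      = (ot.zip ((PySem.List.enumerate ot s).map (fun p => f p.1))).foldl
          (fun d p => d.insert p.1 p.2) d := by
  induction ot generalizing s d with
  | nil => simp [PySem.List.enumerate_nil]
  | cons x xs ih =>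
    simp only [PySem.List.enumerate_cons, List.map_cons, List.zip_cons_cons, List.foldl_cons]
    exact ih (s + 1) _

-- B's port in closed form: the generator's value list is take/pad/join-tail
theorem pv_alt_closed (ot tl : List String) (h : 0 < ot.length) :
    match_original_and_translated_alt ot tl
      = ((ot.zip (tl.take (ot.length - 1) ++ List.replicate (ot.length - 1 - tl.length) ""
          ++ [PySem.Str.join "\n" (tl.drop (ot.length - 1))])).foldl
        (fun (d : PySem.Dict String String) p => d.insert p.1 p.2) PySem.Dict.empty).items := by
  unfold match_original_and_translated_alt
  simp [pvFittedGo_eq, h]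

theorem match_original_and_translated_spec' (ot tl : List String) :
    match_original_and_translated ot tl = match_original_and_translated_alt ot tl := by
  rcases Nat.eq_zero_or_pos ot.length with h0 | h0
  · have hot : ot = [] := List.length_eq_zero_iff.mp h0
    subst hot
    unfold match_original_and_translated match_original_and_translated_alt
    rcases tl with _ | ⟨t, ts⟩ <;>
      simp [PySem.List.enumerate_nil, pvFittedGo]
  · rw [pv_alt_closed ot tl h0]
    unfold match_original_and_translated
    set J := PySem.Str.join "\n" (tl.drop (ot.length - 1)) with hJ
    by_cases h1 : ot.length = tl.length
    · rw [if_pos h1]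
      -- equal lengths: the generator's value list is tl itself
      have hk : ot.length - 1 < tl.length := by omega
      have hdrop : tl.drop (ot.length - 1) = [tl[ot.length - 1]] := by
        rw [List.drop_eq_getElem_cons hk]
        rw [List.drop_eq_nil_of_le (by omega)]
      have hvals : tl.take (ot.length - 1) ++ List.replicate (ot.length - 1 - tl.length) ""
          ++ [J] = tl := by
        rw [hJ, hdrop]
        have hjs : PySem.Str.join "\n" [tl[ot.length - 1]] = tl[ot.length - 1] := by
          simp [PySem.Str.join]
        rw [hjs]
        have hrep : ot.length - 1 - tl.length = 0 := by omega
        rw [hrep, List.replicate_zero, List.append_nil]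
        conv_rhs => rw [← List.take_append_drop (ot.length - 1) tl]
        rw [hdrop]
      rw [hvals]
    · rw [if_neg h1]
      by_cases h2 : tl.length < ot.length
      · rw [if_pos h2]
        have hbody : (fun (d : PySem.Dict String String) (p : Int × String) =>
            if p.1 < (tl.length : Int) then d.insert p.2 (PySem.List.pyGetD tl p.1 "")
            else d.insert p.2 "")
            = fun d p => d.insert p.2 (if p.1 < (tl.length : Int)
                then PySem.List.pyGetD tl p.1 "" else "") := by
          funext d p; split <;> rfl
        rw [hbody, pv_fold_enum_eq_fold_zip (fun i => if i < (tl.length : Int)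
          then PySem.List.pyGetD tl i "" else "")]
        have hJempty : J = "" := by
          rw [hJ, List.drop_eq_nil_of_le (by omega)]
          simp [PySem.Str.join]
        have hvals : (PySem.List.enumerate ot 0).map
              (fun p => if p.1 < (tl.length : Int) then PySem.List.pyGetD tl p.1 "" else "")
            = tl.take (ot.length - 1) ++ List.replicate (ot.length - 1 - tl.length) "" ++ [J] := by
          apply List.ext_getElem
          · simp [PySem.List.length_enumerate]; omega
          · intro i hi hj
            simp only [List.getElem_map, PySem.List.getElem_enumerate, zero_add]
            by_cases hm : i < tl.length
            · rw [if_pos (by exact_mod_cast hm)]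
              rw [List.getElem_append_left (by simp; omega)]
              rw [List.getElem_append_left (by simp; omega)]
              simp [PySem.List.pyGetD_natCast, List.getD_eq_getElem?_getD,
                List.getElem?_eq_getElem hm, List.getElem_take]
            · rw [if_neg (by exact_mod_cast hm)]
              by_cases hl : i < ot.length - 1
              · rw [List.getElem_append_left (by simp; omega)]
                rw [List.getElem_append_right (by simp; omega)]
                simp
              · rw [List.getElem_append_right (by simp; omega)]
                simp [hJempty]
        rw [hvals]
      · rw [if_neg h2]
        have h3 : ot.length < tl.length := by omega
        have hbody : (fun (d : PySem.Dict String String) (p : Int × String) =>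
            if p.1 < (ot.length : Int) - 1 then d.insert p.2 (PySem.List.pyGetD tl p.1 "")
            else d.insert p.2 (PySem.Str.join "\n" (PySem.List.slice tl (some p.1) none)))
            = fun d p => d.insert p.2 (if p.1 < (ot.length : Int) - 1
                then PySem.List.pyGetD tl p.1 ""
                else PySem.Str.join "\n" (PySem.List.slice tl (some p.1) none)) := by
          funext d p; split <;> rfl
        rw [hbody, pv_fold_enum_eq_fold_zip (fun i => if i < (ot.length : Int) - 1
          then PySem.List.pyGetD tl i ""
          else PySem.Str.join "\n" (PySem.List.slice tl (some i) none))]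
        have hvals : (PySem.List.enumerate ot 0).map
              (fun p => if p.1 < (ot.length : Int) - 1 then PySem.List.pyGetD tl p.1 ""
                else PySem.Str.join "\n" (PySem.List.slice tl (some p.1) none))
            = tl.take (ot.length - 1) ++ List.replicate (ot.length - 1 - tl.length) "" ++ [J] := by
          apply List.ext_getElem
          · simp [PySem.List.length_enumerate]; omega
          · intro i hi hj
            simp only [List.length_map, PySem.List.length_enumerate] at hi
            simp only [List.getElem_map, PySem.List.getElem_enumerate, zero_add]
            by_cases hlast : i = ot.length - 1
            · subst hlast
              rw [if_neg (by omega)]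
              rw [List.getElem_append_right (by simp; omega)]
              simp only [List.length_append, List.length_take, List.length_replicate]
              rw [List.getElem_singleton]
              rw [hJ]
              congr 1
              rw [PySem.List.slice_from tl (Int.natCast_nonneg _)]
              rw [Int.toNat_natCast]
            · rw [if_pos (by omega)]
              have him : i < tl.length := by omega
              rw [List.getElem_append_left (by simp; omega)]
              rw [List.getElem_append_left (by simp; omega)]
              simp [PySem.List.pyGetD_natCast, List.getD_eq_getElem?_getD,
                List.getElem?_eq_getElem him, List.getElem_take]
        rw [hvals]

-- ===== VERDICT (by name: the statement is the Claim_ definition above) =====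
theorem match_original_and_translated_spec : Claim_equal_match_original_and_translated := by
  intro ot tl _
  exact match_original_and_translated_spec' ot tl
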